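-- pv_equiv track=rewrite | github.com/nahowo/Algorithm-study | 백준/Silver/1331. 나이트 투어/나이트 투어.py | check
-- ===== SOURCE A (Python) =====
-- def check(p,n):
--     d=[(1,2),(-1,2),(1,-2),(-1,-2),(2,1),(-2,1),(2,-1),(-2,-1)]
--     for x,y in d:
--         a1,b1=ord(p[0]),int(p[1])
--         a2,b2=ord(n[0]),int(n[1])
--         if a1+x==a2 and b1+y==b2:
--             return True
--     return False
-- ===== SOURCE B (Python) =====
-- def check(p, n):
--     dx = ord(n[0]) - ord(p[0])
--     dy = int(n[1]) - int(p[1])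
--     return (abs(dx), abs(dy)) in {(1, 2), (2, 1)}
-- ===== Notes on version B (the rewrite author's own statement) =====
-- stated objective: simpler
-- what changed: Replaces the loop over the 8 knight offsets by a closed-form test on the absolute displacement pair (|dx|,|dy|) in {(1,2),(2,1)}.
import Mathlib
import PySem

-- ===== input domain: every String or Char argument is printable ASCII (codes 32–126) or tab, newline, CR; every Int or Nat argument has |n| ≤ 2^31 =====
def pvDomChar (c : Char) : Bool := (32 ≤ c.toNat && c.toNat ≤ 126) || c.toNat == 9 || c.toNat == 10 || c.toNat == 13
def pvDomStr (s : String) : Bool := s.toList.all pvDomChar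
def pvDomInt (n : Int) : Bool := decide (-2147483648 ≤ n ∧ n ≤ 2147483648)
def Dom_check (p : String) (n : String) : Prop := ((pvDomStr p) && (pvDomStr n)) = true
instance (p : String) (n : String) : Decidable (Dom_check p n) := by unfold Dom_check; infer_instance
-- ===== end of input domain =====

-- B replaces A's loop over the 8 knight offsets by a closed-form test on the absolute displacement pair.

-- shared primitive helpers (exact on inputs admitted by Pre_check):
-- ord(s[i]) as an Int (Pre_check guarantees the index is in range)
def ordAt (s : String) (i : Int) : Int := ((PySem.Str.pyGet? s i).getD ' ').toNat
-- int(s[i]) for a single digit character (Pre_check guarantees s[i] is an ASCII digit)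
def intAt (s : String) (i : Int) : Int := (((PySem.Str.pyGet? s i).getD '0').toNat : Int) - 48

-- ===== PORT A =====
def checkLoop (p : String) (n : String) : List (Int × Int) → Bool
  | [] => false
  | (x, y) :: rest =>
      let a1 := ordAt p 0
      let b1 := intAt p 1
      let a2 := ordAt n 0
      let b2 := intAt n 1
      if a1 + x == a2 && b1 + y == b2 then true else checkLoop p n rest

def check (p : String) (n : String) : Bool :=
  checkLoop p n [(1,2),(-1,2),(1,-2),(-1,-2),(2,1),(-2,1),(2,-1),(-2,-1)]

-- ===== PORT B =====
def check_alt (p : String) (n : String) : Bool :=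
  let dx := ordAt n 0 - ordAt p 0
  let dy := intAt n 1 - intAt p 1
  (dx.natAbs == 1 && dy.natAbs == 2) || (dx.natAbs == 2 && dy.natAbs == 1)

-- ===== PRECONDITION & SPEC =====
-- Pre_check admits exactly the inputs where Python A returns: each string has length ≥ 2
-- and its second character is an ASCII digit (otherwise ord(s[0])/int(s[1]) raises IndexError/ValueError).
def Pre_check (p : String) (n : String) : Prop :=
  (match p.toList with | _ :: c :: _ => c.isDigit | _ => false) = true ∧
  (match n.toList with | _ :: c :: _ => c.isDigit | _ => false) = true
instance (p : String) (n : String) : Decidable (Pre_check p n) := by unfold Pre_check; infer_instance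

def pvWitness_check : String × String := ("a1", "b3")

def Spec_check (p : String) (n : String) (out : Bool) : Prop := out = check_alt p n
instance (p : String) (n : String) (out : Bool) : Decidable (Spec_check p n out) := by unfold Spec_check; infer_instance

-- ===== CLAIM (what is proved, stated in full; the proofs are below) =====
def Claim_equal_check : Prop := ∀ (p : String) (n : String), Dom_check p n → Pre_check p n → Spec_check p n (check p n)

-- ===== LEMMAS AND PROOFS =====
theorem loop_closed (p n : String) :
    checkLoop p n [(1,2),(-1,2),(1,-2),(-1,-2),(2,1),(-2,1),(2,-1),(-2,-1)] = check_alt p n := by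
  simp only [checkLoop, check_alt]
  generalize ordAt p 0 = a1
  generalize intAt p 1 = b1
  generalize ordAt n 0 = a2
  generalize intAt n 1 = b2
  simp only [Bool.and_eq_true, beq_iff_eq]
  split_ifs <;> simp_all <;> omega

-- ===== VERDICT (by name: the statement is the Claim_ definition above) =====
theorem check_spec : Claim_equal_check := by
  intro p n _ _
  unfold Spec_check check
  exact loop_closed p n
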